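-- pv_equiv track=rewrite | github.com/duanhx1037/helix_run | vllm_profiling/probe_vllm_capacity.py | _format_vllm_blocks_dict_python
-- ===== SOURCE A (Python) =====
-- from typing import Any, Dict, List, Optional, Sequence, Tuple
--
-- def _format_vllm_blocks_dict_python(blocks_by_layer: Dict[int, int]) -> str:
--     lines = ["vllm_num_blocks_dict: Dict[int, int] = {"]
--     keys = sorted(blocks_by_layer.keys())
--     row: List[str] = []
--     for k in keys:
--         row.append(f"{k}: {blocks_by_layer[k]}")
--         if len(row) >= 6:
--             lines.append("    " + ", ".join(row) + ",")
--             row = []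
--     if row:
--         lines.append("    " + ", ".join(row) + ",")
--     lines.append("}")
--     return "\n".join(lines)
-- ===== SOURCE B (Python) =====
-- def _format_vllm_blocks_dict_python(blocks_by_layer):
--     keys = sorted(blocks_by_layer.keys())
--     lines = ["vllm_num_blocks_dict: Dict[int, int] = {"]
--     for i in range(0, len(keys), 6):
--         chunk = keys[i:i + 6]
--         lines.append("    " + ", ".join(f"{k}: {blocks_by_layer[k]}" for k in chunk) + ",")
--     lines.append("}")
--     return "\n".join(lines)
-- ===== Notes on version B (the rewrite author's own statement) =====
-- stated objective: simpler
-- what changed: A's running row buffer with its in-loop flush at 6 entries and post-loop leftover flush is replaced by direct chunking: one loop over chunk start indices range(0, len(keys), 6) that slices keys[i:i+6] and emits one line per chunk, so there is no accumulator state and only one emit site.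
import Mathlib
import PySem

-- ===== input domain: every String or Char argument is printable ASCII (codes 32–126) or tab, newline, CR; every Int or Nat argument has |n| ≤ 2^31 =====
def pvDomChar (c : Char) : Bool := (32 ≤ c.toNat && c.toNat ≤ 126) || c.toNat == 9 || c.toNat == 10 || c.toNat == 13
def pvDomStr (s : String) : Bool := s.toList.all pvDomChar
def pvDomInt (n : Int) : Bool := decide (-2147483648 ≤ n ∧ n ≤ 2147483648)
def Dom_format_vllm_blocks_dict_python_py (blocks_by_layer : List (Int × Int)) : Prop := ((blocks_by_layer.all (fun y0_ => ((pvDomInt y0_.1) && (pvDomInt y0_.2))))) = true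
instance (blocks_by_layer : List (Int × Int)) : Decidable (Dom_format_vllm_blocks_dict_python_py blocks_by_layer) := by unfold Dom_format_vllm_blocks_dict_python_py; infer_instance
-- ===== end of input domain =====

-- B replaces A's running row buffer (flush at 6 inside the loop plus a leftover flush after it)
-- by direct take/drop chunking of the sorted key list: simpler, one emit site, no accumulator.

-- ===== PORT A =====
-- f"{k}: {blocks_by_layer[k]}" (the key k is always present, so the lookup cannot raise)
def pvEntry (d : PySem.Dict Int Int) (k : Int) : String :=
  PySem.Int.toStr k ++ ": " ++ PySem.Int.toStr (d.getD k 0)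

-- "    " + ", ".join(row) + ","
def pvEmit (row : List String) : String :=
  "    " ++ PySem.Str.join ", " row ++ ","

-- A's for-loop: state = (lines, row); append entry, flush row into lines when it reaches 6
def pvLoopA (d : PySem.Dict Int Int) : List Int → List String → List String → List String × List String
  | [], lines, row => (lines, row)
  | k :: ks, lines, row =>
    let row' := row ++ [pvEntry d k]
    if 6 ≤ row'.length then pvLoopA d ks (lines ++ [pvEmit row']) []
    else pvLoopA d ks lines row'

def format_vllm_blocks_dict_python_py (blocks_by_layer : List (Int × Int)) : String :=
  let d := PySem.Dict.ofList blocks_by_layer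
  let keys := PySem.List.sorted d.keys (fun k => k) false
  let st := pvLoopA d keys ["vllm_num_blocks_dict: Dict[int, int] = {"] []
  let lines := if st.2 ≠ [] then st.1 ++ [pvEmit st.2] else st.1
  PySem.Str.join "\n" (lines ++ ["}"])

-- ===== PORT B =====
-- B's for-loop over chunk start indices i = 0, 6, 12, …: one emitted line per slice keys[i:i+6]
def format_vllm_blocks_dict_python_py_alt (blocks_by_layer : List (Int × Int)) : String :=
  let d := PySem.Dict.ofList blocks_by_layer
  let keys := PySem.List.sorted d.keys (fun k => k) false
  let body := (PySem.List.pyRange 0 (keys.length : Int) 6).map (fun i =>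
    pvEmit ((PySem.List.slice keys (some i) (some (i + 6))).map (pvEntry d)))
  PySem.Str.join "\n" (("vllm_num_blocks_dict: Dict[int, int] = {" :: body) ++ ["}"])

-- ===== PRECONDITION & SPEC =====
def Spec_format_vllm_blocks_dict_python_py (blocks_by_layer : List (Int × Int)) (out : String) : Prop := out = format_vllm_blocks_dict_python_py_alt blocks_by_layer
instance (blocks_by_layer : List (Int × Int)) (out : String) : Decidable (Spec_format_vllm_blocks_dict_python_py blocks_by_layer out) := by unfold Spec_format_vllm_blocks_dict_python_py; infer_instance

-- ===== CLAIM (what is proved, stated in full; the proofs are below) =====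
def Claim_equal_format_vllm_blocks_dict_python_py : Prop := ∀ (blocks_by_layer : List (Int × Int)), Dom_format_vllm_blocks_dict_python_py blocks_by_layer → Spec_format_vllm_blocks_dict_python_py blocks_by_layer (format_vllm_blocks_dict_python_py blocks_by_layer)

-- ===== LEMMAS AND PROOFS =====

-- proof-side: the chunk lines, one per 6-key block
def pvChunksB (d : PySem.Dict Int Int) : List Int → List String
  | [] => []
  | k :: ks =>
    pvEmit (((k :: ks).take 6).map (pvEntry d)) :: pvChunksB d ((k :: ks).drop 6)
termination_by keys => keys.length
decreasing_by simp

-- A's loop followed by the leftover flush, as one recursion (proof-side restatement)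
def pvW (d : PySem.Dict Int Int) : List Int → List String → List String
  | [], row => if row = [] then [] else [pvEmit row]
  | k :: ks, row =>
    let row' := row ++ [pvEntry d k]
    if 6 ≤ row'.length then pvEmit row' :: pvW d ks [] else pvW d ks row'

theorem pvLoopA_flush (d : PySem.Dict Int Int) :
    ∀ (ks : List Int) (lines row : List String),
      (if (pvLoopA d ks lines row).2 ≠ [] then (pvLoopA d ks lines row).1 ++ [pvEmit (pvLoopA d ks lines row).2]
       else (pvLoopA d ks lines row).1) = lines ++ pvW d ks row := by
  intro ks
  induction ks with
  | nil =>
    intro lines row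
    by_cases h : row = [] <;> simp [pvLoopA, pvW, h]
  | cons k ks ih =>
    intro lines row
    by_cases h : 6 ≤ (row ++ [pvEntry d k]).length
    · simp only [pvLoopA, pvW, h, if_pos]
      rw [ih]
      simp
    · simp only [pvLoopA, pvW, h, if_false]
      exact ih lines (row ++ [pvEntry d k])

@[simp] theorem pvChunksB_nil (d : PySem.Dict Int Int) : pvChunksB d [] = [] := by
  simp [pvChunksB]

theorem pvChunksB_cons (d : PySem.Dict Int Int) (k : Int) (ks : List Int) :
    pvChunksB d (k :: ks) = pvEmit (((k :: ks).take 6).map (pvEntry d)) :: pvChunksB d ((k :: ks).drop 6) := by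
  rw [pvChunksB.eq_def]

theorem pvW_eq_chunks (d : PySem.Dict Int Int) :
    ∀ (ks : List Int) (row : List String), row.length < 6 →
      pvW d ks row =
        (if row = [] ∧ ks = [] then []
         else pvEmit (row ++ (ks.take (6 - row.length)).map (pvEntry d)) :: pvChunksB d (ks.drop (6 - row.length))) := by
  intro ks
  induction ks with
  | nil =>
    intro row hrow
    by_cases h : row = [] <;> simp [pvW, h]
  | cons k ks ih =>
    intro row hrow
    by_cases h5 : row.length = 5
    · have h6 : 6 ≤ (row ++ [pvEntry d k]).length := by simp [h5]
      have hrow' : row ≠ [] := by intro h; simp [h] at h5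
      have h61 : 6 - row.length = 1 := by omega
      simp only [pvW, h6, if_pos]
      rw [ih [] (by simp)]
      cases ks with
      | nil => simp [h61, hrow']
      | cons k' ks' =>
        simp only [hrow', false_and, if_neg, not_false_iff, h61, List.length_nil, Nat.sub_zero,
          List.nil_append, List.take_succ_cons, List.take_zero, List.map_cons, List.map_nil,
          List.drop_succ_cons, List.drop_zero]
        rw [pvChunksB_cons d k' ks']
        simp
    · have hlt : row.length < 5 := by omega
      have h6 : ¬ 6 ≤ (row ++ [pvEntry d k]).length := by simp; omega
      simp only [pvW, h6, if_false]
      rw [ih (row ++ [pvEntry d k]) (by simp; omega)]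
      have hne : row ++ [pvEntry d k] ≠ [] := by simp
      have htk : 6 - row.length = (6 - (row ++ [pvEntry d k]).length) + 1 := by simp; omega
      simp only [hne, false_and, if_neg, not_false_iff]
      rw [htk]
      simp [List.take_succ_cons, List.drop_succ_cons]

theorem pvW_nil_row (d : PySem.Dict Int Int) (ks : List Int) : pvW d ks [] = pvChunksB d ks := by
  rw [pvW_eq_chunks d ks [] (by simp)]
  cases ks with
  | nil => simp
  | cons k ks' => rw [pvChunksB_cons]; simp

theorem pvSlice6 (ks : List Int) (j : Nat) :
    PySem.List.slice ks (some (6 * (j : Int))) (some (6 * (j : Int) + 6)) = (ks.drop (6 * j)).take 6 := by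
  have h := PySem.List.slice_natCast_add ks (6 * j) 6
  push_cast at h
  exact h

theorem pvRangeG (d : PySem.Dict Int Int) :
    ∀ (n : Nat) (ks : List Int), ks.length ≤ n →
      (List.range ((ks.length + 5) / 6)).map
          (fun j => pvEmit (((ks.drop (6 * j)).take 6).map (pvEntry d))) = pvChunksB d ks := by
  intro n
  induction n with
  | zero =>
    intro ks hks
    have : ks = [] := List.eq_nil_of_length_eq_zero (by omega)
    simp [this]
  | succ n ih =>
    intro ks hks
    cases ks with
    | nil => simp
    | cons k t =>
      have hc : ((k :: t).length + 5) / 6 = (((k :: t).drop 6).length + 5) / 6 + 1 := by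
        simp only [List.length_cons, List.length_drop]; omega
      have htail :
          List.map ((fun j => pvEmit (((List.drop (6 * j) (k :: t)).take 6).map (pvEntry d))) ∘ Nat.succ)
              (List.range ((((k :: t).drop 6).length + 5) / 6))
            = pvChunksB d ((k :: t).drop 6) := by
        rw [← ih ((k :: t).drop 6) (by simp only [List.length_drop, List.length_cons] at hks ⊢; omega)]
        apply List.map_congr_left
        intro j hj
        simp only [Function.comp_apply, Nat.succ_eq_add_one]
        have h1 : 6 * (j + 1) = 6 + 6 * j := by ring
        rw [h1, ← List.drop_drop]
      have hhead : pvEmit (((List.drop (6 * 0) (k :: t)).take 6).map (pvEntry d))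
            = pvEmit (((k :: t).take 6).map (pvEntry d)) := by norm_num
      rw [hc, List.range_succ_eq_map, List.map_cons, List.map_map, pvChunksB_cons, hhead, htail]

theorem pvBody_eq (d : PySem.Dict Int Int) (ks : List Int) :
    (PySem.List.pyRange 0 (ks.length : Int) 6).map (fun i =>
        pvEmit ((PySem.List.slice ks (some i) (some (i + 6))).map (pvEntry d))) = pvChunksB d ks := by
  rw [PySem.List.pyRange_of_pos _ _ (by norm_num : (0:Int) < 6)]
  by_cases h : ks = []
  · simp [h]
  · have hlen : 0 < ks.length := List.length_pos_iff.mpr h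
    rw [if_pos (by exact_mod_cast hlen), List.map_map]
    have hc : (((ks.length : Int) - 0 + 6 - 1) / 6).toNat = (ks.length + 5) / 6 := by omega
    rw [hc, ← pvRangeG d ks.length ks le_rfl]
    apply List.map_congr_left
    intro j hj
    simp only [Function.comp_apply, zero_add]
    rw [pvSlice6]

-- ===== VERDICT (by name: the statement is the Claim_ definition above) =====
theorem format_vllm_blocks_dict_python_py_spec : Claim_equal_format_vllm_blocks_dict_python_py := by
  unfold Claim_equal_format_vllm_blocks_dict_python_py
  intro bl _
  unfold Spec_format_vllm_blocks_dict_python_py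
  unfold format_vllm_blocks_dict_python_py format_vllm_blocks_dict_python_py_alt
  simp only []
  rw [pvLoopA_flush, pvW_nil_row, pvBody_eq]
  simp
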